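-- pv_equiv track=rewrite | github.com/0AdityaD/11-23-fall-invitational | bumpsetspikecount/submissions/accepted/arknave.py | solve
-- ===== SOURCE A (Python) =====
-- MOD = int(1e9 + 7)
--
-- def solve(n):
--     if n == 0:
--         return 1
--     elif n == 1:
--         return 12
--
--     # dp[i][j] = number of sequences where team i is the last team to hit
--     # j means if the same team has hit twice
--     dp = [[6, 0], [6, 0]]
--
--     for _ in range(1, n):
--         ndp = [[0, 0], [0, 0]]
--         for i in range(2):
--             for j in range(2):
--                 # swap teams
--                 ndp[i ^ 1][0] += 6 * dp[i][j] % MOD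
--                 if j == 0:
--                     ndp[i][1] += 5 * dp[i][j] % MOD
--         dp = ndp
--
--     return sum(map(sum, ndp)) % MOD
-- ===== SOURCE B (Python) =====
-- MOD = int(1e9 + 7)
--
-- def solve(n):
--     # Matrix exponentiation of the 2x2 linear recurrence (a, b) -> (6a+6b, 5a) mod MOD.
--     if n == 0:
--         return 1
--     if n == 1:
--         return 12
--
--     def mul(X, Y):
--         a, b, c, d = X
--         e, f, g, h = Y
--         return ((a * e + b * g) % MOD, (a * f + b * h) % MOD,
--                 (c * e + d * g) % MOD, (c * f + d * h) % MOD)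
--
--     def mpow(X, e):
--         if e == 0:
--             return (1, 0, 0, 1)
--         H = mpow(X, e // 2)
--         S = mul(H, H)
--         return mul(X, S) if e % 2 else S
--
--     a, b, c, d = mpow((6, 6, 5, 0), n - 1)
--     # apply the matrix power to the initial vector (6, 0); answer = 2*(a_k + b_k)
--     return (2 * (a * 6 + c * 6)) % MOD
-- ===== Notes on version B (the rewrite author's own statement) =====
-- stated objective: faster
-- what changed: Replaced the O(n) dynamic-programming loop over hit counts by O(log n) binary matrix exponentiation of the 2x2 linear recurrence (a,b) -> (6a+6b, 5a) mod 1e9+7, applied to the initial vector (6,0).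
import Mathlib
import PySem

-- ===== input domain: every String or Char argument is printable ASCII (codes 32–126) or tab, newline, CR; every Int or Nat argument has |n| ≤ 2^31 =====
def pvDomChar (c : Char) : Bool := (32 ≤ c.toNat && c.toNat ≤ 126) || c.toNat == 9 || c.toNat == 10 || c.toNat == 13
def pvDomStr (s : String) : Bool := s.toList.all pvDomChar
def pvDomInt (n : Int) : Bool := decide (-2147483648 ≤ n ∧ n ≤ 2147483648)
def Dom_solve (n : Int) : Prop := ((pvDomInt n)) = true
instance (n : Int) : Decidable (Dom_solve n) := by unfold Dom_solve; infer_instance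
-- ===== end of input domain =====

-- B replaces A's O(n) DP loop by O(log n) binary matrix exponentiation of the same
-- 2x2 linear recurrence (objective: faster, asymptotic).

-- ===== PORT A =====
-- A's dp is the fixed-shape 2x2 list [[a0,b0],[a1,b1]], ported as a pair of pairs;
-- the constant-bound inner loops over i,j in range(2) are unrolled in source order.
def solve (n : Int) : Int :=
  if n == 0 then 1
  else if n == 1 then 12
  else
    let dp := ((6, 0), ((6 : Int), (0 : Int)))
    let ndp := (PySem.List.pyRange 1 n 1).foldl (fun dp _ =>
      let a0 := dp.1.1; let b0 := dp.1.2; let a1 := dp.2.1; let b1 := dp.2.2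
      ((PySem.Int.mod (6 * a1) 1000000007 + PySem.Int.mod (6 * b1) 1000000007,
        PySem.Int.mod (5 * a0) 1000000007),
       (PySem.Int.mod (6 * a0) 1000000007 + PySem.Int.mod (6 * b0) 1000000007,
        PySem.Int.mod (5 * a1) 1000000007))) dp
    PySem.Int.mod (ndp.1.1 + ndp.1.2 + ndp.2.1 + ndp.2.2) 1000000007

-- ===== PORT B =====
-- 2x2 matrix (a,b;c,d) as a flat 4-tuple; multiplication mod 1e9+7 (Source B's mul)
def bMul (X Y : Int × Int × Int × Int) : Int × Int × Int × Int :=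
  (PySem.Int.mod (X.1 * Y.1 + X.2.1 * Y.2.2.1) 1000000007,
   PySem.Int.mod (X.1 * Y.2.1 + X.2.1 * Y.2.2.2) 1000000007,
   PySem.Int.mod (X.2.2.1 * Y.1 + X.2.2.2 * Y.2.2.1) 1000000007,
   PySem.Int.mod (X.2.2.1 * Y.2.1 + X.2.2.2 * Y.2.2.2) 1000000007)

-- Source B's mpow by repeated squaring (e ≥ 0 inside Pre_, so a Nat exponent is exact)
def bPow (X : Int × Int × Int × Int) : Nat → Int × Int × Int × Int
  | 0 => (1, 0, 0, 1)
  | (e + 1) =>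
    let H := bPow X ((e + 1) / 2)
    let S := bMul H H
    if (e + 1) % 2 = 1 then bMul X S else S
decreasing_by omega

def solve_alt (n : Int) : Int :=
  if n == 0 then 1
  else if n == 1 then 12
  else
    let p := bPow (6, 6, 5, 0) (n - 1).toNat
    PySem.Int.mod (2 * (p.1 * 6 + p.2.2.1 * 6)) 1000000007

-- ===== PRECONDITION & SPEC =====
-- For n < 0 the Python A raises NameError (the loop body never runs and ndp is
-- unbound), so exactly those inputs are excluded.
def Pre_solve (n : Int) : Prop := 0 ≤ n
instance (n : Int) : Decidable (Pre_solve n) := by unfold Pre_solve; infer_instance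
def pvWitness_solve : Int := (5)
def Spec_solve (n : Int) (out : Int) : Prop := out = solve_alt n
instance (n : Int) (out : Int) : Decidable (Spec_solve n out) := by unfold Spec_solve; infer_instance

-- ===== CLAIM (what is proved, stated in full; the proofs are below) =====
def Claim_equal_solve : Prop := ∀ (n : Int), Dom_solve n → Pre_solve n → Spec_solve n (solve n)

-- ===== LEMMAS AND PROOFS =====
-- We work in ZMod 1000000007 for the congruence argument.

def zMul (X Y : ZMod 1000000007 × ZMod 1000000007 × ZMod 1000000007 × ZMod 1000000007) :
    ZMod 1000000007 × ZMod 1000000007 × ZMod 1000000007 × ZMod 1000000007 :=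
  (X.1 * Y.1 + X.2.1 * Y.2.2.1,
   X.1 * Y.2.1 + X.2.1 * Y.2.2.2,
   X.2.2.1 * Y.1 + X.2.2.2 * Y.2.2.1,
   X.2.2.1 * Y.2.1 + X.2.2.2 * Y.2.2.2)

def zPow (X : ZMod 1000000007 × ZMod 1000000007 × ZMod 1000000007 × ZMod 1000000007) :
    Nat → ZMod 1000000007 × ZMod 1000000007 × ZMod 1000000007 × ZMod 1000000007
  | 0 => (1, 0, 0, 1)
  | (e + 1) => zMul X (zPow X e)

def z4 (X : Int × Int × Int × Int) :
    ZMod 1000000007 × ZMod 1000000007 × ZMod 1000000007 × ZMod 1000000007 :=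
  ((X.1 : ZMod 1000000007), (X.2.1 : ZMod 1000000007),
   (X.2.2.1 : ZMod 1000000007), (X.2.2.2 : ZMod 1000000007))

theorem castemod (a : Int) :
    ((a % (1000000007 : Int) : Int) : ZMod 1000000007) = (a : ZMod 1000000007) := by
  exact_mod_cast ZMod.intCast_mod a 1000000007

theorem z4_bMul (X Y : Int × Int × Int × Int) : z4 (bMul X Y) = zMul (z4 X) (z4 Y) := by
  simp [bMul, zMul, z4, castemod]

theorem zMul_one_left (Y : ZMod 1000000007 × ZMod 1000000007 × ZMod 1000000007 × ZMod 1000000007) :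
    zMul (1, 0, 0, 1) Y = Y := by
  simp [zMul]

theorem zMul_assoc (X Y Z : ZMod 1000000007 × ZMod 1000000007 × ZMod 1000000007 × ZMod 1000000007) :
    zMul (zMul X Y) Z = zMul X (zMul Y Z) := by
  simp only [zMul, Prod.mk.injEq]
  refine ⟨by ring, by ring, by ring, by ring⟩

theorem zPow_add (X : ZMod 1000000007 × ZMod 1000000007 × ZMod 1000000007 × ZMod 1000000007)
    (a b : Nat) : zPow X (a + b) = zMul (zPow X a) (zPow X b) := by
  induction a with
  | zero => simp [zPow, zMul_one_left]
  | succ a ih =>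
      have h : a + 1 + b = (a + b) + 1 := by omega
      rw [h, zPow, zPow, ih, zMul_assoc]

theorem z4_bPow (X : Int × Int × Int × Int) (e : Nat) : z4 (bPow X e) = zPow (z4 X) e := by
  induction e using Nat.strong_induction_on with
  | _ e ih =>
    match e with
    | 0 => simp [bPow, zPow, z4]
    | (e + 1) =>
      rw [bPow]
      have hlt : (e + 1) / 2 < e + 1 := by omega
      have hH := ih ((e + 1) / 2) hlt
      by_cases hodd : (e + 1) % 2 = 1
      · rw [if_pos hodd, z4_bMul, z4_bMul, hH, ← zPow_add]
        set m := (e + 1) / 2 with hm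
        have he : e + 1 = m + m + 1 := by omega
        rw [he, zPow]
      · rw [if_neg hodd, z4_bMul, hH, ← zPow_add]
        set m := (e + 1) / 2 with hm
        have he : e + 1 = m + m := by omega
        rw [he]

-- ---- A side ----

def aStep2 (u : Int × Int) : Int × Int :=
  (PySem.Int.mod (6 * u.1) 1000000007 + PySem.Int.mod (6 * u.2) 1000000007,
   PySem.Int.mod (5 * u.1) 1000000007)

def zStep (u : ZMod 1000000007 × ZMod 1000000007) : ZMod 1000000007 × ZMod 1000000007 :=
  (6 * u.1 + 6 * u.2, 5 * u.1)

def z2 (u : Int × Int) : ZMod 1000000007 × ZMod 1000000007 :=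
  ((u.1 : ZMod 1000000007), (u.2 : ZMod 1000000007))

theorem z2_aStep2 (u : Int × Int) : z2 (aStep2 u) = zStep (z2 u) := by
  simp [aStep2, zStep, z2, castemod]

-- A's symmetric loop: the fold from a symmetric state collapses to iterating aStep2
theorem solve_loop (l : List Int) (u : Int × Int) :
    (List.foldl (fun (dp : (Int × Int) × (Int × Int)) (_ : Int) =>
      ((PySem.Int.mod (6 * dp.2.1) 1000000007 + PySem.Int.mod (6 * dp.2.2) 1000000007,
        PySem.Int.mod (5 * dp.1.1) 1000000007),
       (PySem.Int.mod (6 * dp.1.1) 1000000007 + PySem.Int.mod (6 * dp.1.2) 1000000007,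
        PySem.Int.mod (5 * dp.2.1) 1000000007))) (u, u) l) =
      (aStep2^[l.length] u, aStep2^[l.length] u) := by
  induction l generalizing u with
  | nil => simp
  | cons x xs ih =>
      rw [List.foldl_cons]
      have hstep : ((PySem.Int.mod (6 * u.1) 1000000007 + PySem.Int.mod (6 * u.2) 1000000007,
          PySem.Int.mod (5 * u.1) 1000000007),
         (PySem.Int.mod (6 * u.1) 1000000007 + PySem.Int.mod (6 * u.2) 1000000007,
          PySem.Int.mod (5 * u.1) 1000000007)) = ((aStep2 u, aStep2 u) :
            (Int × Int) × (Int × Int)) := by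
        simp [aStep2]
      rw [hstep, ih (aStep2 u)]
      simp [Function.iterate_succ_apply]

-- the ZMod 2-state iterate is the B-side matrix power applied to (6, 0)
theorem zStep_iterate_eq (k : Nat) :
    zStep^[k] ((6 : ZMod 1000000007), (0 : ZMod 1000000007)) =
      ((zPow (6, 6, 5, 0) k).1 * 6, (zPow (6, 6, 5, 0) k).2.2.1 * 6) := by
  induction k with
  | zero => simp [zPow]
  | succ k ih =>
      rw [Function.iterate_succ_apply', ih, zPow]
      simp only [zStep, zMul, Prod.mk.injEq]
      constructor <;> ring

theorem z2_iterate (k : Nat) :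
    z2 (aStep2^[k] ((6 : Int), (0 : Int))) = zStep^[k] ((6 : ZMod 1000000007), 0) := by
  induction k with
  | zero => simp [z2]
  | succ k ih => rw [Function.iterate_succ_apply', Function.iterate_succ_apply', z2_aStep2, ih]

theorem mod_eq_of_cast_eq (x y : Int)
    (h : (x : ZMod 1000000007) = (y : ZMod 1000000007)) :
    PySem.Int.mod x 1000000007 = PySem.Int.mod y 1000000007 := by
  rw [PySem.Int.mod_eq_emod_of_pos (show (0:Int) < 1000000007 by norm_num),
      PySem.Int.mod_eq_emod_of_pos (show (0:Int) < 1000000007 by norm_num)]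
  have h' := (ZMod.intCast_eq_intCast_iff x y 1000000007).mp h
  simpa [Int.ModEq] using h'

-- ===== VERDICT (by name: the statement is the Claim_ definition above) =====
theorem solve_spec : Claim_equal_solve := by
  intro n _ hpre
  unfold Spec_solve
  by_cases h0 : n = 0
  · simp [solve, solve_alt, h0]
  · by_cases h1 : n = 1
    · simp [solve, solve_alt, h1]
    · have h2 : 2 ≤ n := by
        have : (0 : Int) ≤ n := hpre
        omega
      simp only [solve, solve_alt, beq_iff_eq, h0, h1, if_false]
      rw [solve_loop, PySem.List.length_pyRange_one]
      set k : Nat := (n - 1).toNat with hk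
      dsimp only
      apply mod_eq_of_cast_eq
      have hz : z2 (aStep2^[k] ((6 : Int), (0 : Int))) =
          ((zPow (6, 6, 5, 0) k).1 * 6, (zPow (6, 6, 5, 0) k).2.2.1 * 6) := by
        rw [z2_iterate, zStep_iterate_eq]
      have hb' : z4 (bPow (6, 6, 5, 0) k) = zPow (6, 6, 5, 0) k := by
        rw [z4_bPow]; norm_num [z4]
      have e1 : ((aStep2^[k] ((6 : Int), (0 : Int))).1 : ZMod 1000000007) =
          (zPow (6, 6, 5, 0) k).1 * 6 := congrArg Prod.fst hz
      have e2 : ((aStep2^[k] ((6 : Int), (0 : Int))).2 : ZMod 1000000007) =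
          (zPow (6, 6, 5, 0) k).2.2.1 * 6 := congrArg Prod.snd hz
      have f1 : ((bPow (6, 6, 5, 0) k).1 : ZMod 1000000007) = (zPow (6, 6, 5, 0) k).1 :=
        congrArg Prod.fst hb'
      have f2 : ((bPow (6, 6, 5, 0) k).2.2.1 : ZMod 1000000007) =
          (zPow (6, 6, 5, 0) k).2.2.1 := congrArg (fun p => p.2.2.1) hb'
      push_cast
      rw [e1, e2, f1, f2]
      ring
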